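-- pv_equiv track=rewrite | github.com/leemzheg/AtomSeqTools | bin/dev/fusion_QC_filter.py | calculate_primer_frequency
-- ===== SOURCE A (Python) =====
-- def calculate_primer_frequency(junction_reads, read_primer):
--     fusion_primer_depth = {}
--     fusion_primer_read = {}
--     fusion_intarget_read = []
--     fusion_outoftarget_read = []
--     for read in junction_reads.split(","):
--         read_name = read.split("@")[-1]
--         if read_name in read_primer:
--             fusion_intarget_read.append(read_name)
--             primer = read_primer[read_name]
--             if primer not in fusion_primer_depth:
--                 fusion_primer_depth[primer] = 1
--                 fusion_primer_read[primer] = [read_name]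
--             else:
--                 fusion_primer_depth[primer] += 1
--                 fusion_primer_read[primer].append(read_name)
--         else:
--             fusion_outoftarget_read.append(read_name)
--
--     return (
--         fusion_primer_depth,
--         fusion_primer_read,
--         fusion_intarget_read,
--         fusion_outoftarget_read,
--     )
-- ===== SOURCE B (Python) =====
-- def calculate_primer_frequency(junction_reads, read_primer):
--     names = [read.split("@")[-1] for read in junction_reads.split(",")]
--     fusion_intarget_read = [n for n in names if n in read_primer]
--     fusion_outoftarget_read = [n for n in names if n not in read_primer]
--     fusion_primer_read = {}
--     for n in fusion_intarget_read:
--         fusion_primer_read.setdefault(read_primer[n], []).append(n)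
--     fusion_primer_depth = {p: len(v) for p, v in fusion_primer_read.items()}
--     return (
--         fusion_primer_depth,
--         fusion_primer_read,
--         fusion_intarget_read,
--         fusion_outoftarget_read,
--     )
-- ===== Notes on version B (the rewrite author's own statement) =====
-- stated objective: simpler
-- what changed: Single interleaved loop with a dual counter/group branch is replaced by: extract names once, partition them by dict membership, group in-target names with setdefault, and derive the depth dict as group lengths afterwards.
import Mathlib
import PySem

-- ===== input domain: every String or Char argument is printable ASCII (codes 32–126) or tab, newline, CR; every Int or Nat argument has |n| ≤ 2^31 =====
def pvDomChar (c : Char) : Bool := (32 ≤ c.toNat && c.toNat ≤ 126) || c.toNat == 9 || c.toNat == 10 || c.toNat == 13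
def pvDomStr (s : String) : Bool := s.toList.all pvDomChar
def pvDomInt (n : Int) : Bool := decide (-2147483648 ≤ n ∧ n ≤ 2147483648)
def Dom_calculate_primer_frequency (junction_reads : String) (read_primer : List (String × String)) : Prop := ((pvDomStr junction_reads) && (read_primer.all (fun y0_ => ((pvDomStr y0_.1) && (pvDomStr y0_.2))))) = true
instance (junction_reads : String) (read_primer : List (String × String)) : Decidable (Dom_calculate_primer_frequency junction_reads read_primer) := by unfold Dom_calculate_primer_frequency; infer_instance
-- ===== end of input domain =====

-- B replaces A's single interleaved loop (counter + group + two appends per read) by: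
-- compute the read names once, partition them by dict membership, group the in-target
-- names with one grouping pass, and derive the depth dict as the group lengths (simpler).

-- ===== PORT A =====
-- read.split("@")[-1]
def pvName (read : String) : String :=
  PySem.List.pyGetD ((PySem.Str.split? read "@").getD []) (-1) ""

-- A's loop body, step for step
def pvStepA (rp : PySem.Dict String String)
    (st : PySem.Dict String Int × PySem.Dict String (List String) × List String × List String)
    (read : String) :
    PySem.Dict String Int × PySem.Dict String (List String) × List String × List String :=
  let read_name := pvName read
  if rp.contains read_name then
    let primer := rp.getD read_name ""
    if !(st.1.contains primer) then
      (st.1.insert primer 1, st.2.1.insert primer [read_name], st.2.2.1 ++ [read_name], st.2.2.2)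
    else
      (st.1.modify primer 0 (· + 1), st.2.1.modify primer [] (· ++ [read_name]), st.2.2.1 ++ [read_name], st.2.2.2)
  else
    (st.1, st.2.1, st.2.2.1, st.2.2.2 ++ [read_name])

def calculate_primer_frequency (junction_reads : String) (read_primer : List (String × String)) : (List (String × Int)) × (List (String × List String)) × List String × List String :=
  let rp : PySem.Dict String String := PySem.Dict.mk read_primer
  let st := ((PySem.Str.split? junction_reads ",").getD []).foldl (pvStepA rp)
      (PySem.Dict.empty, PySem.Dict.empty, [], [])
  (st.1.items, st.2.1.items, st.2.2.1, st.2.2.2)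

-- ===== PORT B =====
def calculate_primer_frequency_alt (junction_reads : String) (read_primer : List (String × String)) : (List (String × Int)) × (List (String × List String)) × List String × List String :=
  let d : PySem.Dict String String := PySem.Dict.mk read_primer
  let names := ((PySem.Str.split? junction_reads ",").getD []).map pvName
  let intr := names.filter (fun n => d.contains n)
  let outr := names.filter (fun n => !(d.contains n))
  -- setdefault(key, []).append(n) on a PySem.Dict is exactly modify key [] (· ++ [n])
  let grp := intr.foldl
      (fun (g : PySem.Dict String (List String)) n => g.modify (d.getD n "") [] (· ++ [n]))
      PySem.Dict.empty
  let depth := grp.items.map (fun p => (p.1, (p.2.length : Int)))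
  (depth, grp.items, intr, outr)

-- ===== PRECONDITION & SPEC =====
def Spec_calculate_primer_frequency (junction_reads : String) (read_primer : List (String × String)) (out : (List (String × Int)) × (List (String × List String)) × List String × List String) : Prop := out = calculate_primer_frequency_alt junction_reads read_primer
instance (junction_reads : String) (read_primer : List (String × String)) (out : (List (String × Int)) × (List (String × List String)) × List String × List String) : Decidable (Spec_calculate_primer_frequency junction_reads read_primer out) := by unfold Spec_calculate_primer_frequency; infer_instance

-- ===== CLAIM (what is proved, stated in full; the proofs are below) =====
def Claim_equal_calculate_primer_frequency : Prop := ∀ (junction_reads : String) (read_primer : List (String × String)), Dom_calculate_primer_frequency junction_reads read_primer → Spec_calculate_primer_frequency junction_reads read_primer (calculate_primer_frequency junction_reads read_primer)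

-- ===== LEMMAS AND PROOFS =====

/-- The depth dict determined by a group dict: same keys, values replaced by lengths. -/
def pvDepthOf (g : PySem.Dict String (List String)) : PySem.Dict String Int :=
  PySem.Dict.mk (g.items.map (fun p => (p.1, (p.2.length : Int))))

theorem pvDepthOf_items (g : PySem.Dict String (List String)) :
    (pvDepthOf g).items = g.items.map (fun p => (p.1, (p.2.length : Int))) := rfl

theorem pvDepthOf_get? (g : PySem.Dict String (List String)) (k : String) :
    (pvDepthOf g).get? k = (g.get? k).map (fun v => (v.length : Int)) := by
  obtain ⟨l⟩ := g
  induction l with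
  | nil => rfl
  | cons p l ih =>
    simp only [pvDepthOf, List.map_cons, PySem.Dict.get?, List.find?_cons] at *
    by_cases h : p.1 == k
    · simp [h]
    · simp only [h]
      exact ih

theorem pvDepthOf_contains (g : PySem.Dict String (List String)) (k : String) :
    (pvDepthOf g).contains k = g.contains k := by
  rw [PySem.Dict.contains_eq_isSome_get?, PySem.Dict.contains_eq_isSome_get?, pvDepthOf_get?]
  cases g.get? k <;> rfl

theorem pvGet?_none_of_not_contains (g : PySem.Dict String (List String)) (k : String)
    (hc : g.contains k = false) : g.get? k = none := by
  rw [PySem.Dict.contains_eq_isSome_get?] at hc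
  cases h : g.get? k
  · rfl
  · rw [h] at hc; simp at hc

theorem pvDepthOf_step_old (g : PySem.Dict String (List String)) (k n : String)
    (hc : g.contains k = true) :
    (pvDepthOf g).modify k 0 (· + 1) = pvDepthOf (g.modify k [] (· ++ [n])) := by
  have hd : (pvDepthOf g).contains k = true := by rwa [pvDepthOf_contains]
  obtain ⟨v, hv⟩ : ∃ v, g.get? k = some v := by
    rw [PySem.Dict.contains_eq_isSome_get?] at hc
    exact Option.isSome_iff_exists.mp hc
  have hgd : (pvDepthOf g).getD k 0 = (v.length : Int) := by
    simp [PySem.Dict.getD, pvDepthOf_get?, hv]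
  have hvd : g.getD k [] = v := by simp [PySem.Dict.getD, hv]
  apply PySem.Dict.ext
  rw [PySem.Dict.modify, PySem.Dict.modify]
  simp only [PySem.Dict.items_insert_of_contains _ _ hd,
    PySem.Dict.items_insert_of_contains _ _ hc, pvDepthOf_items, List.map_map, hgd]
  apply List.map_congr_left
  intro p _
  by_cases hp : p.1 = k
  · simp [hp, hvd, List.length_append]
  · simp [hp]

theorem pvDepthOf_step_new (g : PySem.Dict String (List String)) (k n : String)
    (hc : g.contains k = false) :
    (pvDepthOf g).insert k 1 = pvDepthOf (g.modify k [] (· ++ [n])) := by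
  have hd : (pvDepthOf g).contains k = false := by rwa [pvDepthOf_contains]
  have hn := pvGet?_none_of_not_contains g k hc
  apply PySem.Dict.ext
  rw [PySem.Dict.modify]
  simp only [PySem.Dict.items_insert_of_not_contains _ _ hd,
    PySem.Dict.items_insert_of_not_contains _ _ hc, pvDepthOf_items, List.map_append]
  simp [PySem.Dict.getD, hn]

theorem pvInsert_eq_modify_of_not_contains (g : PySem.Dict String (List String)) (k n : String)
    (hc : g.contains k = false) :
    g.insert k [n] = g.modify k [] (· ++ [n]) := by
  rw [PySem.Dict.modify]
  simp [PySem.Dict.getD, pvGet?_none_of_not_contains g k hc]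

/-- Main loop invariant: A's fold, from a state whose depth component is determined by the
group component, produces B's group fold, its derived depth, and the two partitions appended. -/
theorem pvMain (rp : PySem.Dict String String) (reads : List String) :
    ∀ (g : PySem.Dict String (List String)) (intr outr : List String),
    reads.foldl (pvStepA rp) (pvDepthOf g, g, intr, outr)
    = (pvDepthOf (((reads.map pvName).filter (fun n => rp.contains n)).foldl
          (fun g n => g.modify (rp.getD n "") [] (· ++ [n])) g),
       ((reads.map pvName).filter (fun n => rp.contains n)).foldl
          (fun g n => g.modify (rp.getD n "") [] (· ++ [n])) g,
       intr ++ (reads.map pvName).filter (fun n => rp.contains n),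
       outr ++ (reads.map pvName).filter (fun n => !(rp.contains n))) := by
  induction reads with
  | nil => intro g intr outr; simp
  | cons read reads ih =>
    intro g intr outr
    by_cases h : rp.contains (pvName read)
    · by_cases hg : g.contains (rp.getD (pvName read) "")
      · have hd : (pvDepthOf g).contains (rp.getD (pvName read) "") = true := by
          rwa [pvDepthOf_contains]
        simp only [List.foldl_cons, List.map_cons, List.filter_cons, h, if_pos, pvStepA, hd,
          Bool.not_true, Bool.false_eq_true, if_false]
        rw [pvDepthOf_step_old g _ (pvName read) hg, ih]
        simp
      · have hg' : g.contains (rp.getD (pvName read) "") = false := by simpa using hg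
        have hd : (pvDepthOf g).contains (rp.getD (pvName read) "") = false := by
          rwa [pvDepthOf_contains]
        simp only [List.foldl_cons, List.map_cons, List.filter_cons, h, pvStepA, hd,
          Bool.not_false, if_true]
        rw [pvDepthOf_step_new g _ (pvName read) hg',
            pvInsert_eq_modify_of_not_contains g _ (pvName read) hg', ih]
        simp
    · have h' : rp.contains (pvName read) = false := by simpa using h
      simp only [List.foldl_cons, List.map_cons, List.filter_cons, pvStepA, h',
        Bool.false_eq_true, if_false, Bool.not_false, if_true]
      rw [ih]
      simp

-- ===== VERDICT (by name: the statement is the Claim_ definition above) =====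
theorem calculate_primer_frequency_spec : Claim_equal_calculate_primer_frequency := by
  intro junction_reads read_primer _
  unfold Spec_calculate_primer_frequency
  simp only [calculate_primer_frequency, calculate_primer_frequency_alt]
  have h0 : (PySem.Dict.empty : PySem.Dict String Int) = pvDepthOf PySem.Dict.empty := rfl
  rw [h0, pvMain]
  simp only [pvDepthOf_items, List.nil_append]
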